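-- pv_equiv track=rewrite | github.com/SukunaShinmyoumaru-hust/Hust-opensource-Xuejie | IIB 自然语言处理/U202315752-陈宇航-本硕博2301-课程报告源码/segmentation/shared/hmm.py | index_corpus
-- ===== SOURCE A (Python) =====
-- def index_corpus(corpus):
--     """ 将数据集进行编码
--
--         Args:
--           corpus: 格式必须为[[(obsv, hide), (obsv,hide),...], ...]
--
--         Returns:
--           idxed_corpus: 编码后的corpus,格式不变
--           (obsv2idx, idx2obsv): 两个dict用于观察值与其编码之间的转换
--           (hide2idx, idx2hide): 两个dict用于隐藏值与其编码之间的转换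
--     """
--     obsv2idx, idx2obsv = {'unk': 0}, {0: 'unk'}
--     hide2idx, idx2hide = {}, {}
--     obsv_idx, hide_idx = 1, 0
--
--     # build dictionaries and indexing
--     idxed_corpus = []
--     for seq in corpus:
--         idxed_seq = []
--         for obsv, hide in seq:
--             if obsv not in obsv2idx.keys():
--                 obsv2idx[obsv] = obsv_idx
--                 idx2obsv[obsv_idx] = obsv
--                 obsv_idx += 1
--             if hide not in hide2idx.keys():
--                 hide2idx[hide] = hide_idx
--                 idx2hide[hide_idx] = hide
--                 hide_idx += 1
--             # indexing
--             idxed_seq.append((obsv2idx[obsv], hide2idx[hide]))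
--         idxed_corpus.append(idxed_seq)
--
--     return idxed_corpus, (obsv2idx, idx2obsv), (hide2idx, idx2hide)
-- ===== SOURCE B (Python) =====
-- def index_corpus(corpus):
--     """Vocabulary as ordered dedup of the flattened corpus; dicts by enumerate comprehensions; encode by lookup."""
--     pairs = [p for seq in corpus for p in seq]
--     obsvs = list(dict.fromkeys(['unk'] + [o for o, _ in pairs]))
--     hides = list(dict.fromkeys(h for _, h in pairs))
--     obsv2idx = {o: i for i, o in enumerate(obsvs)}
--     idx2obsv = {i: o for i, o in enumerate(obsvs)}
--     hide2idx = {h: i for i, h in enumerate(hides)}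
--     idx2hide = {i: h for i, h in enumerate(hides)}
--     idxed_corpus = [[(obsv2idx[o], hide2idx[h]) for o, h in seq] for seq in corpus]
--     return idxed_corpus, (obsv2idx, idx2obsv), (hide2idx, idx2hide)
-- ===== Notes on version B (the rewrite author's own statement) =====
-- stated objective: alternative
-- what changed: B removes A's interleaved pass with explicit counters and membership tests entirely: it flattens the corpus, takes the ordered dedup (dict.fromkeys) of the observation stream seeded with 'unk' and of the hidden stream, builds all four dictionaries as enumerate comprehensions over those vocabulary lists, and encodes by pure lookups.
import Mathlib
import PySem

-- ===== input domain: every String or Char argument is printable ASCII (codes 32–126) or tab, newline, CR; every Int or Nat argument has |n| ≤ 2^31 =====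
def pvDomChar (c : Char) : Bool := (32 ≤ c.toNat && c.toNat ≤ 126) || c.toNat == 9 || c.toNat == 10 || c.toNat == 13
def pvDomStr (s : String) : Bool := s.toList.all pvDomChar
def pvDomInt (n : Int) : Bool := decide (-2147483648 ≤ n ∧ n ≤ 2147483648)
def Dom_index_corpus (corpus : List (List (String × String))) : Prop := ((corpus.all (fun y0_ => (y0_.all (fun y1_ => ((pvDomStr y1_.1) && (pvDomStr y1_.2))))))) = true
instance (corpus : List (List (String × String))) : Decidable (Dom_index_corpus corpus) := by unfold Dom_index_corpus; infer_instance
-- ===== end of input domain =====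

-- B replaces A's interleaved pass (membership tests + explicit counters) by an ordered dedup
-- of the flattened corpus and enumerate-built dictionaries (alternative decomposition; same cost).

-- ===== PORT A =====
-- A: one interleaved pass; state = (idxed tail, obsv2idx, idx2obsv, hide2idx, idx2hide, obsv_idx, hide_idx)
def index_corpus_seqA (o2i : PySem.Dict String Int) (i2o : PySem.Dict Int String)
    (h2i : PySem.Dict String Int) (i2h : PySem.Dict Int String) (oi hi : Int) :
    List (String × String) →
      List (Int × Int) × PySem.Dict String Int × PySem.Dict Int String ×
        PySem.Dict String Int × PySem.Dict Int String × Int × Int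
  | [] => ([], o2i, i2o, h2i, i2h, oi, hi)
  | (o, h) :: rest =>
    let a := if o2i.contains o then (o2i, i2o, oi)
             else (o2i.insert o oi, i2o.insert oi o, oi + 1)
    let b := if h2i.contains h then (h2i, i2h, hi)
             else (h2i.insert h hi, i2h.insert hi h, hi + 1)
    let r := index_corpus_seqA a.1 a.2.1 b.1 b.2.1 a.2.2 b.2.2 rest
    ((a.1.getD o 0, b.1.getD h 0) :: r.1, r.2)

def index_corpus_goA (o2i : PySem.Dict String Int) (i2o : PySem.Dict Int String)
    (h2i : PySem.Dict String Int) (i2h : PySem.Dict Int String) (oi hi : Int) :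
    List (List (String × String)) →
      List (List (Int × Int)) × PySem.Dict String Int × PySem.Dict Int String ×
        PySem.Dict String Int × PySem.Dict Int String × Int × Int
  | [] => ([], o2i, i2o, h2i, i2h, oi, hi)
  | seq :: rest =>
    let r := index_corpus_seqA o2i i2o h2i i2h oi hi seq
    let r2 := index_corpus_goA r.2.1 r.2.2.1 r.2.2.2.1 r.2.2.2.2.1 r.2.2.2.2.2.1 r.2.2.2.2.2.2 rest
    (r.1 :: r2.1, r2.2)

def index_corpus (corpus : List (List (String × String))) : (List (List (Int × Int))) × ((List (String × Int)) × (List (Int × String))) × ((List (String × Int)) × (List (Int × String))) :=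
  let r := index_corpus_goA (PySem.Dict.ofList [("unk", (0 : Int))]) (PySem.Dict.ofList [((0 : Int), "unk")])
    PySem.Dict.empty PySem.Dict.empty 1 0 corpus
  (r.1, (r.2.1.items, r.2.2.1.items), (r.2.2.2.1.items, r.2.2.2.2.1.items))

-- ===== PORT B =====
-- B: flatten; vocabularies = ordered dedup (dict.fromkeys) of the two token streams, the
-- observation one seeded with 'unk'; four dicts by enumerate comprehensions; encode by lookups.
def index_corpus_alt (corpus : List (List (String × String))) : (List (List (Int × Int))) × ((List (String × Int)) × (List (Int × String))) × ((List (String × Int)) × (List (Int × String))) :=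
  let pairs := corpus.flatMap (fun seq => seq)
  let obsvs := PySem.List.dedup ("unk" :: pairs.map (fun p => p.1))
  let hides := PySem.List.dedup (pairs.map (fun p => p.2))
  let obsv2idx : PySem.Dict String Int := PySem.Dict.ofList ((PySem.List.enumerate obsvs).map (fun q => (q.2, q.1)))
  let idx2obsv : PySem.Dict Int String := PySem.Dict.ofList (PySem.List.enumerate obsvs)
  let hide2idx : PySem.Dict String Int := PySem.Dict.ofList ((PySem.List.enumerate hides).map (fun q => (q.2, q.1)))
  let idx2hide : PySem.Dict Int String := PySem.Dict.ofList (PySem.List.enumerate hides)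
  (corpus.map (fun seq => seq.map (fun p => (obsv2idx.getD p.1 0, hide2idx.getD p.2 0))),
   (obsv2idx.items, idx2obsv.items), (hide2idx.items, idx2hide.items))

-- ===== PRECONDITION & SPEC =====
def Spec_index_corpus (corpus : List (List (String × String))) (out : (List (List (Int × Int))) × ((List (String × Int)) × (List (Int × String))) × ((List (String × Int)) × (List (Int × String)))) : Prop := out = index_corpus_alt corpus
instance (corpus : List (List (String × String))) (out : (List (List (Int × Int))) × ((List (String × Int)) × (List (Int × String))) × ((List (String × Int)) × (List (Int × String)))) : Decidable (Spec_index_corpus corpus out) := by unfold Spec_index_corpus; infer_instance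

-- ===== CLAIM (what is proved, stated in full; the proofs are below) =====
def Claim_equal_index_corpus : Prop := ∀ (corpus : List (List (String × String))), Dom_index_corpus corpus → Spec_index_corpus corpus (index_corpus corpus)

-- ===== LEMMAS AND PROOFS =====

-- proof-only bridge: A's interleaved step, with the counters replaced by the dict sizes
def index_corpus_build
    (st : PySem.Dict String Int × PySem.Dict Int String × PySem.Dict String Int × PySem.Dict Int String)
    (p : String × String) :
    PySem.Dict String Int × PySem.Dict Int String × PySem.Dict String Int × PySem.Dict Int String :=
  let a := if st.1.contains p.1 then (st.1, st.2.1)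
           else (st.1.insert p.1 (st.1.size : Int), st.2.1.insert (st.1.size : Int) p.1)
  let b := if st.2.2.1.contains p.2 then (st.2.2.1, st.2.2.2)
           else (st.2.2.1.insert p.2 (st.2.2.1.size : Int), st.2.2.2.insert (st.2.2.1.size : Int) p.2)
  (a.1, a.2, b.1, b.2)

-- canonical dictionaries built from a vocabulary list
def pvToIdx (os : List String) : PySem.Dict String Int :=
  PySem.Dict.ofList ((PySem.List.enumerate os).map (fun q => (q.2, q.1)))
def pvFromIdx (os : List String) : PySem.Dict Int String :=
  PySem.Dict.ofList (PySem.List.enumerate os)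

theorem items_ofList_nodup {κ ν : Type} [BEq κ] [LawfulBEq κ] (l : List (κ × ν))
    (h : (l.map Prod.fst).Nodup) : (PySem.Dict.ofList l).items = l := by
  unfold PySem.Dict.ofList PySem.Dict.update
  rw [PySem.Dict.items_foldl_insert_fresh]
  · simp [PySem.Dict.empty]
  · intro a _; simp
  · simpa using h

theorem items_pvToIdx (os : List String) (h : os.Nodup) :
    (pvToIdx os).items = (PySem.List.enumerate os).map (fun q => (q.2, q.1)) := by
  apply items_ofList_nodup
  rw [List.map_map]
  have e : (Prod.fst ∘ fun (q : Int × String) => (q.2, q.1)) = fun q => q.2 := rfl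
  rw [e, PySem.List.map_snd_enumerate]
  exact h

theorem items_pvFromIdx (os : List String) :
    (pvFromIdx os).items = PySem.List.enumerate os := by
  apply items_ofList_nodup
  simp only [PySem.List.map_fst_enumerate]
  exact PySem.List.nodup_pyRange_one 0 (0 + (os.length : Int))

theorem keys_pvToIdx (os : List String) (h : os.Nodup) : (pvToIdx os).keys = os := by
  show (pvToIdx os).items.map Prod.fst = os
  rw [items_pvToIdx os h, List.map_map]
  have e : (Prod.fst ∘ fun (q : Int × String) => (q.2, q.1)) = fun q => q.2 := rfl
  rw [e, PySem.List.map_snd_enumerate]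

theorem size_pvToIdx (os : List String) (h : os.Nodup) : (pvToIdx os).size = os.length := by
  show (pvToIdx os).items.length = os.length
  rw [items_pvToIdx os h]
  simp [PySem.List.length_enumerate]

theorem contains_pvToIdx (os : List String) (h : os.Nodup) (o : String) :
    (pvToIdx os).contains o = decide (o ∈ os) := by
  rw [PySem.Dict.contains_eq_decide_mem_keys, keys_pvToIdx os h]

theorem contains_pvFromIdx_len (os : List String) :
    (pvFromIdx os).contains ((os.length : Nat) : Int) = false := by
  rw [PySem.Dict.contains_eq_decide_mem_keys]
  show decide (_ ∈ (pvFromIdx os).items.map Prod.fst) = false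
  rw [items_pvFromIdx, PySem.List.map_fst_enumerate]
  simp [PySem.List.mem_pyRange_one]

theorem pvToIdx_insert (os : List String) (h : os.Nodup) (o : String) (ho : o ∉ os) :
    (pvToIdx os).insert o ((os.length : Nat) : Int) = pvToIdx (os ++ [o]) := by
  have hnd : (os ++ [o]).Nodup := by
    exact List.Nodup.append h (List.nodup_singleton o)
      (by simpa [List.disjoint_singleton] using ho)
  apply PySem.Dict.ext
  rw [PySem.Dict.items_insert_of_not_contains _ _ (by rw [contains_pvToIdx os h]; simpa using ho)]
  rw [items_pvToIdx os h, items_pvToIdx _ hnd, PySem.List.enumerate_append]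
  simp [PySem.List.enumerate_cons, PySem.List.enumerate_nil]

theorem pvFromIdx_insert (os : List String) (o : String) :
    (pvFromIdx os).insert ((os.length : Nat) : Int) o = pvFromIdx (os ++ [o]) := by
  apply PySem.Dict.ext
  rw [PySem.Dict.items_insert_of_not_contains _ _ (contains_pvFromIdx_len os)]
  rw [items_pvFromIdx, items_pvFromIdx, PySem.List.enumerate_append]
  simp [PySem.List.enumerate_cons, PySem.List.enumerate_nil]

theorem set_add_eq (os : List String) (o : String) :
    PySem.Set.add os o = if o ∈ os then os else os ++ [o] := by
  simp [PySem.Set.add, PySem.Set.contains]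

theorem build_step (os hs : List String) (h1 : os.Nodup) (h2 : hs.Nodup) (o h : String) :
    index_corpus_build (pvToIdx os, pvFromIdx os, pvToIdx hs, pvFromIdx hs) (o, h) =
      (pvToIdx (PySem.Set.add os o), pvFromIdx (PySem.Set.add os o),
       pvToIdx (PySem.Set.add hs h), pvFromIdx (PySem.Set.add hs h)) := by
  unfold index_corpus_build
  rw [set_add_eq, set_add_eq]
  by_cases ho : o ∈ os <;> by_cases hh : h ∈ hs
  · simp [contains_pvToIdx os h1, contains_pvToIdx hs h2, ho, hh]
  · simp [contains_pvToIdx os h1, contains_pvToIdx hs h2, ho, hh, size_pvToIdx hs h2,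
      pvToIdx_insert hs h2 h hh, pvFromIdx_insert hs h]
  · simp [contains_pvToIdx os h1, contains_pvToIdx hs h2, ho, hh, size_pvToIdx os h1,
      pvToIdx_insert os h1 o ho, pvFromIdx_insert os o]
  · simp [contains_pvToIdx os h1, contains_pvToIdx hs h2, ho, hh, size_pvToIdx os h1,
      size_pvToIdx hs h2, pvToIdx_insert os h1 o ho, pvFromIdx_insert os o,
      pvToIdx_insert hs h2 h hh, pvFromIdx_insert hs h]

theorem build_fold (ts : List (String × String)) (os hs : List String)
    (h1 : os.Nodup) (h2 : hs.Nodup) :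
    ts.foldl index_corpus_build (pvToIdx os, pvFromIdx os, pvToIdx hs, pvFromIdx hs) =
      (pvToIdx (PySem.Set.update os (ts.map (fun p => p.1))),
       pvFromIdx (PySem.Set.update os (ts.map (fun p => p.1))),
       pvToIdx (PySem.Set.update hs (ts.map (fun p => p.2))),
       pvFromIdx (PySem.Set.update hs (ts.map (fun p => p.2)))) := by
  induction ts generalizing os hs with
  | nil => simp [PySem.Set.update]
  | cons p rest ih =>
    obtain ⟨o, h⟩ := p
    rw [List.foldl_cons, build_step os hs h1 h2 o h,
      ih _ _ (PySem.Set.nodup_add os o h1) (PySem.Set.nodup_add hs h h2)]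
    simp [PySem.Set.update]


-- one build step preserves an existing binding in obsv2idx
theorem build_get?_o_stable (st : PySem.Dict String Int × PySem.Dict Int String × PySem.Dict String Int × PySem.Dict Int String)
    (p : String × String) (k : String) (v : Int) (h : st.1.get? k = some v) :
    (index_corpus_build st p).1.get? k = some v := by
  unfold index_corpus_build
  by_cases ho : st.1.contains p.1
  · simp [ho, h]
  · have hk : k ≠ p.1 := by
      intro e; subst e
      rw [PySem.Dict.contains_eq_isSome_get?, h] at ho; simp at ho
    simp [ho, PySem.Dict.get?_insert_of_ne _ _ hk, h]

-- one build step preserves an existing binding in hide2idx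
theorem build_get?_h_stable (st : PySem.Dict String Int × PySem.Dict Int String × PySem.Dict String Int × PySem.Dict Int String)
    (p : String × String) (k : String) (v : Int) (h : st.2.2.1.get? k = some v) :
    (index_corpus_build st p).2.2.1.get? k = some v := by
  unfold index_corpus_build
  by_cases hh : st.2.2.1.contains p.2
  · simp [hh, h]
  · have hk : k ≠ p.2 := by
      intro e; subst e
      rw [PySem.Dict.contains_eq_isSome_get?, h] at hh; simp at hh
    simp [hh, PySem.Dict.get?_insert_of_ne _ _ hk, h]

theorem foldl_get?_o_stable (l : List (String × String))
    (st : PySem.Dict String Int × PySem.Dict Int String × PySem.Dict String Int × PySem.Dict Int String)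
    (k : String) (v : Int) (h : st.1.get? k = some v) :
    (l.foldl index_corpus_build st).1.get? k = some v := by
  induction l generalizing st with
  | nil => exact h
  | cons p rest ih => exact ih _ (build_get?_o_stable st p k v h)

theorem foldl_get?_h_stable (l : List (String × String))
    (st : PySem.Dict String Int × PySem.Dict Int String × PySem.Dict String Int × PySem.Dict Int String)
    (k : String) (v : Int) (h : st.2.2.1.get? k = some v) :
    (l.foldl index_corpus_build st).2.2.1.get? k = some v := by
  induction l generalizing st with
  | nil => exact h
  | cons p rest ih => exact ih _ (build_get?_h_stable st p k v h)

theorem foldlC_get?_o_stable (c : List (List (String × String)))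
    (st : PySem.Dict String Int × PySem.Dict Int String × PySem.Dict String Int × PySem.Dict Int String)
    (k : String) (v : Int) (h : st.1.get? k = some v) :
    (c.foldl (fun st seq => seq.foldl index_corpus_build st) st).1.get? k = some v := by
  induction c generalizing st with
  | nil => exact h
  | cons seq rest ih => exact ih _ (foldl_get?_o_stable seq st k v h)

theorem foldlC_get?_h_stable (c : List (List (String × String)))
    (st : PySem.Dict String Int × PySem.Dict Int String × PySem.Dict String Int × PySem.Dict Int String)
    (k : String) (v : Int) (h : st.2.2.1.get? k = some v) :
    (c.foldl (fun st seq => seq.foldl index_corpus_build st) st).2.2.1.get? k = some v := by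
  induction c generalizing st with
  | nil => exact h
  | cons seq rest ih => exact ih _ (foldl_get?_h_stable seq st k v h)

theorem foldl_contains_o (l : List (String × String))
    (st : PySem.Dict String Int × PySem.Dict Int String × PySem.Dict String Int × PySem.Dict Int String)
    (p : String × String) (hp : p ∈ l) :
    (l.foldl index_corpus_build st).1.contains p.1 = true := by
  induction l generalizing st with
  | nil => cases hp
  | cons q rest ih =>
    rcases List.mem_cons.mp hp with h | h
    · subst h
      have hc : (index_corpus_build st p).1.contains p.1 = true := by
        unfold index_corpus_build
        by_cases ho : st.1.contains p.1
        · simp [ho]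
        · simp [ho, PySem.Dict.contains_insert_self]
      rw [PySem.Dict.contains_eq_isSome_get?] at hc
      obtain ⟨v, hv⟩ := Option.isSome_iff_exists.mp hc
      rw [List.foldl_cons, PySem.Dict.contains_eq_isSome_get?,
        foldl_get?_o_stable rest _ _ _ hv]
      rfl
    · rw [List.foldl_cons]; exact ih _ h

theorem foldl_contains_h (l : List (String × String))
    (st : PySem.Dict String Int × PySem.Dict Int String × PySem.Dict String Int × PySem.Dict Int String)
    (p : String × String) (hp : p ∈ l) :
    (l.foldl index_corpus_build st).2.2.1.contains p.2 = true := by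
  induction l generalizing st with
  | nil => cases hp
  | cons q rest ih =>
    rcases List.mem_cons.mp hp with h | h
    · subst h
      have hc : (index_corpus_build st p).2.2.1.contains p.2 = true := by
        unfold index_corpus_build
        by_cases hh : st.2.2.1.contains p.2
        · simp [hh]
        · simp [hh, PySem.Dict.contains_insert_self]
      rw [PySem.Dict.contains_eq_isSome_get?] at hc
      obtain ⟨v, hv⟩ := Option.isSome_iff_exists.mp hc
      rw [List.foldl_cons, PySem.Dict.contains_eq_isSome_get?,
        foldl_get?_h_stable rest _ _ _ hv]
      rfl
    · rw [List.foldl_cons]; exact ih _ h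

-- a contained key's getD is unchanged by any further building
theorem foldl_getD_o (l : List (String × String))
    (st : PySem.Dict String Int × PySem.Dict Int String × PySem.Dict String Int × PySem.Dict Int String)
    (k : String) (hc : st.1.contains k = true) :
    (l.foldl index_corpus_build st).1.getD k 0 = st.1.getD k 0 := by
  rw [PySem.Dict.contains_eq_isSome_get?] at hc
  obtain ⟨v, hv⟩ := Option.isSome_iff_exists.mp hc
  rw [PySem.Dict.getD_eq_get?_getD, PySem.Dict.getD_eq_get?_getD, hv,
    foldl_get?_o_stable l st k v hv]

theorem foldl_getD_h (l : List (String × String))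
    (st : PySem.Dict String Int × PySem.Dict Int String × PySem.Dict String Int × PySem.Dict Int String)
    (k : String) (hc : st.2.2.1.contains k = true) :
    (l.foldl index_corpus_build st).2.2.1.getD k 0 = st.2.2.1.getD k 0 := by
  rw [PySem.Dict.contains_eq_isSome_get?] at hc
  obtain ⟨v, hv⟩ := Option.isSome_iff_exists.mp hc
  rw [PySem.Dict.getD_eq_get?_getD, PySem.Dict.getD_eq_get?_getD, hv,
    foldl_get?_h_stable l st k v hv]

theorem foldlC_getD_o (c : List (List (String × String)))
    (st : PySem.Dict String Int × PySem.Dict Int String × PySem.Dict String Int × PySem.Dict Int String)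
    (k : String) (hc : st.1.contains k = true) :
    (c.foldl (fun st seq => seq.foldl index_corpus_build st) st).1.getD k 0 = st.1.getD k 0 := by
  rw [PySem.Dict.contains_eq_isSome_get?] at hc
  obtain ⟨v, hv⟩ := Option.isSome_iff_exists.mp hc
  rw [PySem.Dict.getD_eq_get?_getD, PySem.Dict.getD_eq_get?_getD, hv,
    foldlC_get?_o_stable c st k v hv]

theorem foldlC_getD_h (c : List (List (String × String)))
    (st : PySem.Dict String Int × PySem.Dict Int String × PySem.Dict String Int × PySem.Dict Int String)
    (k : String) (hc : st.2.2.1.contains k = true) :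
    (c.foldl (fun st seq => seq.foldl index_corpus_build st) st).2.2.1.getD k 0 = st.2.2.1.getD k 0 := by
  rw [PySem.Dict.contains_eq_isSome_get?] at hc
  obtain ⟨v, hv⟩ := Option.isSome_iff_exists.mp hc
  rw [PySem.Dict.getD_eq_get?_getD, PySem.Dict.getD_eq_get?_getD, hv,
    foldlC_get?_h_stable c st k v hv]

-- A's interleaved pass over one sequence = foldl of the bridge step plus lookups in its final state
theorem seqA_eq (seq : List (String × String))
    (o2i : PySem.Dict String Int) (i2o : PySem.Dict Int String)
    (h2i : PySem.Dict String Int) (i2h : PySem.Dict Int String) :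
    index_corpus_seqA o2i i2o h2i i2h (o2i.size : Int) (h2i.size : Int) seq =
      (seq.map (fun p =>
        ((seq.foldl index_corpus_build (o2i, i2o, h2i, i2h)).1.getD p.1 0,
         (seq.foldl index_corpus_build (o2i, i2o, h2i, i2h)).2.2.1.getD p.2 0)),
       (seq.foldl index_corpus_build (o2i, i2o, h2i, i2h)).1,
       (seq.foldl index_corpus_build (o2i, i2o, h2i, i2h)).2.1,
       (seq.foldl index_corpus_build (o2i, i2o, h2i, i2h)).2.2.1,
       (seq.foldl index_corpus_build (o2i, i2o, h2i, i2h)).2.2.2,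
       ((seq.foldl index_corpus_build (o2i, i2o, h2i, i2h)).1.size : Int),
       ((seq.foldl index_corpus_build (o2i, i2o, h2i, i2h)).2.2.1.size : Int)) := by
  induction seq generalizing o2i i2o h2i i2h with
  | nil => simp [index_corpus_seqA]
  | cons p rest ih =>
    obtain ⟨o, h⟩ := p
    by_cases ho : o2i.contains o <;> by_cases hh : h2i.contains h
    · have hstep : index_corpus_build (o2i, i2o, h2i, i2h) (o, h) = (o2i, i2o, h2i, i2h) := by
        simp [index_corpus_build, ho, hh]
      simp only [index_corpus_seqA, ho, hh, if_true, List.foldl_cons, List.map_cons, hstep]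
      rw [ih]
      rw [foldl_getD_o rest (o2i, i2o, h2i, i2h) o ho, foldl_getD_h rest (o2i, i2o, h2i, i2h) h hh]
    · have hstep : index_corpus_build (o2i, i2o, h2i, i2h) (o, h) =
          (o2i, i2o, h2i.insert h (h2i.size : Int), i2h.insert (h2i.size : Int) h) := by
        simp [index_corpus_build, ho, hh]
      have hsz : (((h2i.insert h (h2i.size : Int)).size : Nat) : Int) = (h2i.size : Int) + 1 := by
        rw [PySem.Dict.size_insert]; simp [hh]
      simp only [index_corpus_seqA]
      rw [if_pos ho, if_neg hh]
      dsimp only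
      simp only [List.foldl_cons, List.map_cons, hstep]
      rw [← hsz, ih]
      rw [foldl_getD_o rest _ o ho,
        foldl_getD_h rest (o2i, i2o, h2i.insert h (h2i.size : Int), i2h.insert (h2i.size : Int) h) h
          (PySem.Dict.contains_insert_self h2i h _)]
    · have hstep : index_corpus_build (o2i, i2o, h2i, i2h) (o, h) =
          (o2i.insert o (o2i.size : Int), i2o.insert (o2i.size : Int) o, h2i, i2h) := by
        simp [index_corpus_build, ho, hh]
      have hsz : (((o2i.insert o (o2i.size : Int)).size : Nat) : Int) = (o2i.size : Int) + 1 := by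
        rw [PySem.Dict.size_insert]; simp [ho]
      simp only [index_corpus_seqA]
      rw [if_neg ho, if_pos hh]
      dsimp only
      simp only [List.foldl_cons, List.map_cons, hstep]
      rw [← hsz, ih]
      rw [foldl_getD_o rest (o2i.insert o (o2i.size : Int), i2o.insert (o2i.size : Int) o, h2i, i2h) o
          (PySem.Dict.contains_insert_self o2i o _),
        foldl_getD_h rest _ h hh]
    · have hstep : index_corpus_build (o2i, i2o, h2i, i2h) (o, h) =
          (o2i.insert o (o2i.size : Int), i2o.insert (o2i.size : Int) o,
           h2i.insert h (h2i.size : Int), i2h.insert (h2i.size : Int) h) := by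
        simp [index_corpus_build, ho, hh]
      have hszo : (((o2i.insert o (o2i.size : Int)).size : Nat) : Int) = (o2i.size : Int) + 1 := by
        rw [PySem.Dict.size_insert]; simp [ho]
      have hszh : (((h2i.insert h (h2i.size : Int)).size : Nat) : Int) = (h2i.size : Int) + 1 := by
        rw [PySem.Dict.size_insert]; simp [hh]
      simp only [index_corpus_seqA]
      rw [if_neg ho, if_neg hh]
      dsimp only
      simp only [List.foldl_cons, List.map_cons, hstep]
      rw [← hszo, ← hszh, ih]
      rw [foldl_getD_o rest (o2i.insert o (o2i.size : Int), i2o.insert (o2i.size : Int) o,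
            h2i.insert h (h2i.size : Int), i2h.insert (h2i.size : Int) h) o
          (PySem.Dict.contains_insert_self o2i o _),
        foldl_getD_h rest (o2i.insert o (o2i.size : Int), i2o.insert (o2i.size : Int) o,
            h2i.insert h (h2i.size : Int), i2h.insert (h2i.size : Int) h) h
          (PySem.Dict.contains_insert_self h2i h _)]

theorem goA_eq (corpus : List (List (String × String)))
    (o2i : PySem.Dict String Int) (i2o : PySem.Dict Int String)
    (h2i : PySem.Dict String Int) (i2h : PySem.Dict Int String) :
    index_corpus_goA o2i i2o h2i i2h (o2i.size : Int) (h2i.size : Int) corpus =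
      (corpus.map (fun seq => seq.map (fun p =>
        ((corpus.foldl (fun st seq => seq.foldl index_corpus_build st) (o2i, i2o, h2i, i2h)).1.getD p.1 0,
         (corpus.foldl (fun st seq => seq.foldl index_corpus_build st) (o2i, i2o, h2i, i2h)).2.2.1.getD p.2 0))),
       (corpus.foldl (fun st seq => seq.foldl index_corpus_build st) (o2i, i2o, h2i, i2h)).1,
       (corpus.foldl (fun st seq => seq.foldl index_corpus_build st) (o2i, i2o, h2i, i2h)).2.1,
       (corpus.foldl (fun st seq => seq.foldl index_corpus_build st) (o2i, i2o, h2i, i2h)).2.2.1,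
       (corpus.foldl (fun st seq => seq.foldl index_corpus_build st) (o2i, i2o, h2i, i2h)).2.2.2,
       ((corpus.foldl (fun st seq => seq.foldl index_corpus_build st) (o2i, i2o, h2i, i2h)).1.size : Int),
       ((corpus.foldl (fun st seq => seq.foldl index_corpus_build st) (o2i, i2o, h2i, i2h)).2.2.1.size : Int)) := by
  induction corpus generalizing o2i i2o h2i i2h with
  | nil => simp [index_corpus_goA]
  | cons seq rest ih =>
    simp only [index_corpus_goA, List.foldl_cons, List.map_cons]
    rw [seqA_eq]
    rw [ih]
    have hmap : ∀ p ∈ seq,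
        (((seq.foldl index_corpus_build (o2i, i2o, h2i, i2h)).1.getD p.1 0,
          (seq.foldl index_corpus_build (o2i, i2o, h2i, i2h)).2.2.1.getD p.2 0) : Int × Int) =
        ((rest.foldl (fun st q => q.foldl index_corpus_build st)
            (seq.foldl index_corpus_build (o2i, i2o, h2i, i2h))).1.getD p.1 0,
         (rest.foldl (fun st q => q.foldl index_corpus_build st)
            (seq.foldl index_corpus_build (o2i, i2o, h2i, i2h))).2.2.1.getD p.2 0) := by
      intro p hp
      rw [foldlC_getD_o rest _ p.1 (foldl_contains_o seq _ p hp),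
        foldlC_getD_h rest _ p.2 (foldl_contains_h seq _ p hp)]
    rw [List.map_congr_left hmap]

-- ===== VERDICT (by name: the statement is the Claim_ definition above) =====
theorem index_corpus_spec : Claim_equal_index_corpus := by
  intro corpus _
  unfold Spec_index_corpus index_corpus index_corpus_alt
  have h := goA_eq corpus (PySem.Dict.ofList [("unk", (0 : Int))])
    (PySem.Dict.ofList [((0 : Int), "unk")]) PySem.Dict.empty PySem.Dict.empty
  have e1 : (((PySem.Dict.ofList [("unk", (0 : Int))] : PySem.Dict String Int).size : Int)) = 1 := rfl
  have e2 : (((PySem.Dict.empty : PySem.Dict String Int).size : Int)) = 0 := rfl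
  rw [e1, e2] at h
  rw [h]
  have s1 : (PySem.Dict.ofList [("unk", (0 : Int))] : PySem.Dict String Int) = pvToIdx ["unk"] := rfl
  have s2 : (PySem.Dict.ofList [((0 : Int), "unk")] : PySem.Dict Int String) = pvFromIdx ["unk"] := rfl
  have s3 : (PySem.Dict.empty : PySem.Dict String Int) = pvToIdx [] := rfl
  have s4 : (PySem.Dict.empty : PySem.Dict Int String) = pvFromIdx [] := rfl
  rw [s1, s2, s3, s4]
  have hfold : corpus.foldl (fun st seq => seq.foldl index_corpus_build st)
      (pvToIdx ["unk"], pvFromIdx ["unk"], pvToIdx [], pvFromIdx []) =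
      (corpus.flatMap (fun seq => seq)).foldl index_corpus_build
      (pvToIdx ["unk"], pvFromIdx ["unk"], pvToIdx [], pvFromIdx []) := by
    rw [List.foldl_flatMap]
  rw [hfold, build_fold _ ["unk"] [] (by simp) (by simp)]
  have ho : PySem.Set.update ["unk"] ((corpus.flatMap (fun seq => seq)).map (fun p => p.1)) =
      PySem.List.dedup ("unk" :: (corpus.flatMap (fun seq => seq)).map (fun p => p.1)) := by
    rw [PySem.List.dedup_eq_ofList]; rfl
  have hh : PySem.Set.update [] ((corpus.flatMap (fun seq => seq)).map (fun p => p.2)) =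
      PySem.List.dedup ((corpus.flatMap (fun seq => seq)).map (fun p => p.2)) := by
    rw [PySem.List.dedup_eq_ofList]; rfl
  rw [ho, hh]
  rfl
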